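-- pv_equiv track=rewrite | github.com/newnamelsl/project | text_enroll_md-share_clean/preprocess/aishell2_kespeech_mandarin/cut_head_100_1channel_100k_aishell/aishell_100k_word_seg/ft_fyt.48zh.20240716/data_process/hanlp_make_datalist_word_seg_lexicon_fast_convert_id.py | detach_item
-- ===== SOURCE A (Python) =====
-- def detach_item(items, word2id, phone2id):
--     max_wrd_id = max(list(word2id.values())) if len(word2id) > 0 else 2
--     max_phn_id = max(list(phone2id.values())) if len(phone2id) > 0 else 2
--     word_seq = []
--     phn_seq = []
--     for item in items:
--         word, init, final = item
--         if word not in word2id: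
--             max_wrd_id += 1
--             word2id[word] = max_wrd_id
--         if init != None and init not in phone2id:
--             max_phn_id += 1
--             phone2id[init] = max_phn_id
--         if final not in phone2id:
--             max_phn_id += 1
--             phone2id[final] = max_phn_id
--         word_seq.append(word2id[word])
--         if init != None:
--             phn_seq.append([phone2id[init], phone2id[final]])
--         else:
--             phn_seq.append([phone2id[final]])
--
--     return word_seq, phn_seq, word2id, phone2id
-- ===== SOURCE B (Python) =====
-- def _phones(init, final):
--     return [final] if init is None else [init, final]
--
--
-- def detach_item(items, word2id, phone2id):
--     base_w = max(word2id.values(), default=2)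
--     base_p = max(phone2id.values(), default=2)
--     # unseen keys deduplicated in first-occurrence order; id = base + 1 + position
--     new_words = list(dict.fromkeys(w for w, _, _ in items if w not in word2id))
--     new_phones = list(dict.fromkeys(p for _, i, f in items for p in _phones(i, f)
--                                     if p not in phone2id))
--     word2id.update((w, base_w + 1 + i) for i, w in enumerate(new_words))
--     phone2id.update((p, base_p + 1 + j) for j, p in enumerate(new_phones))
--     word_seq = [word2id[w] for w, _, _ in items]
--     phn_seq = [[phone2id[p] for p in _phones(i, f)] for _, i, f in items]
--     return word_seq, phn_seq, word2id, phone2id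
-- ===== Notes on version B (the rewrite author's own statement) =====
-- stated objective: alternative
-- what changed: B abandons A's stateful incrementing-counter loop: it deduplicates the unseen word/phone keys in first-occurrence order (dict.fromkeys) and assigns each id arithmetically as base+1+position via enumerate, then builds the sequences by pure lookups in the finished tables.
import Mathlib
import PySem

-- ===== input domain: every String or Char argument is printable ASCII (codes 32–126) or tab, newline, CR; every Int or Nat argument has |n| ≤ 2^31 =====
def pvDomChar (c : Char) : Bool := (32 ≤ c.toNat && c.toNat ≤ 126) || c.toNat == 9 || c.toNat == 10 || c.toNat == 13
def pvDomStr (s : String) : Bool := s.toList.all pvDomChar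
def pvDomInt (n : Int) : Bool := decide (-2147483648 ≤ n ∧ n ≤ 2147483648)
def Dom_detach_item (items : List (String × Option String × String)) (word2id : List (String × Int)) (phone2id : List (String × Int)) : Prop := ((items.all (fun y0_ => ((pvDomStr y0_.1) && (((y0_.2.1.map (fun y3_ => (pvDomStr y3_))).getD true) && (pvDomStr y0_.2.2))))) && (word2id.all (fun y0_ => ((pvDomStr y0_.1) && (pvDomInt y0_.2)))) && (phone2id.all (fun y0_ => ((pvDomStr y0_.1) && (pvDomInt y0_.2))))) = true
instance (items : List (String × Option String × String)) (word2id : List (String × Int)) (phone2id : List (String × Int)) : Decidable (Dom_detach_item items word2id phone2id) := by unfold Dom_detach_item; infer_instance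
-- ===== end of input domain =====

-- B replaces A's stateful incrementing-counter loop by dedup of the unseen keys in
-- first-occurrence order with ids assigned arithmetically as base+1+position, then pure
-- lookups (objective: alternative). Both Pythons mutate the dict arguments in place
-- identically; the theorems here are about the return value.

-- ===== PORT A =====

-- one iteration of A's loop, state = (word2id, phone2id, max_wrd_id, max_phn_id, word_seq, phn_seq)
def detachStepA (st : PySem.Dict String Int × PySem.Dict String Int × Int × Int × List Int × List (List Int))
    (item : String × Option String × String) :
    PySem.Dict String Int × PySem.Dict String Int × Int × Int × List Int × List (List Int) :=
  let (w2, p2, mw, mp, ws, ps) := st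
  let word := item.1
  let init := item.2.1
  let fin := item.2.2
  let (w2, mw) := if w2.contains word then (w2, mw) else (w2.insert word (mw + 1), mw + 1)
  let (p2, mp) :=
    match init with
    | some i => if p2.contains i then (p2, mp) else (p2.insert i (mp + 1), mp + 1)
    | none => (p2, mp)
  let (p2, mp) := if p2.contains fin then (p2, mp) else (p2.insert fin (mp + 1), mp + 1)
  let ws := ws ++ [(w2.get? word).getD 0]   -- word2id[word]: key always present here
  let ps := ps ++ [match init with
    | some i => [(p2.get? i).getD 0, (p2.get? fin).getD 0]
    | none => [(p2.get? fin).getD 0]]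
  (w2, p2, mw, mp, ws, ps)

def detach_item (items : List (String × Option String × String)) (word2id : List (String × Int)) (phone2id : List (String × Int)) : List Int × List (List Int) × (List (String × Int)) × (List (String × Int)) :=
  let w2 : PySem.Dict String Int := PySem.Dict.mk word2id
  let p2 : PySem.Dict String Int := PySem.Dict.mk phone2id
  -- max(list(d.values())) if len(d) > 0 else 2  (the .getD 2 inside the then-branch is never hit)
  let max_wrd_id : Int := if word2id.length > 0 then (PySem.List.max? w2.values (fun v => v)).getD 2 else 2
  let max_phn_id : Int := if phone2id.length > 0 then (PySem.List.max? p2.values (fun v => v)).getD 2 else 2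
  let st := items.foldl detachStepA (w2, p2, max_wrd_id, max_phn_id, [], [])
  (st.2.2.2.2.1, st.2.2.2.2.2, st.1.items, st.2.1.items)

-- ===== PORT B =====

-- _phones(init, final)
def phonesOf (init : Option String) (fin : String) : List String :=
  match init with
  | none => [fin]
  | some i => [i, fin]

def detach_item_alt (items : List (String × Option String × String)) (word2id : List (String × Int)) (phone2id : List (String × Int)) : List Int × List (List Int) × (List (String × Int)) × (List (String × Int)) :=
  let w2 : PySem.Dict String Int := PySem.Dict.mk word2id
  let p2 : PySem.Dict String Int := PySem.Dict.mk phone2id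
  -- max(d.values(), default=2)
  let base_w : Int := (PySem.List.max? w2.values (fun v => v)).getD 2
  let base_p : Int := (PySem.List.max? p2.values (fun v => v)).getD 2
  -- list(dict.fromkeys(…)) = PySem.List.dedup (first occurrences, in order)
  let new_words := PySem.List.dedup ((items.map (fun it => it.1)).filter (fun w => !w2.contains w))
  let new_phones := PySem.List.dedup ((items.flatMap (fun it => phonesOf it.2.1 it.2.2)).filter (fun p => !p2.contains p))
  -- d.update((k, base+1+i) for i, k in enumerate(new))
  let w2f := (PySem.List.enumerate new_words 0).foldl (fun d iw => d.insert iw.2 (base_w + 1 + iw.1)) w2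
  let p2f := (PySem.List.enumerate new_phones 0).foldl (fun d ip => d.insert ip.2 (base_p + 1 + ip.1)) p2
  (items.map (fun it => (w2f.get? it.1).getD 0),
   items.map (fun it => (phonesOf it.2.1 it.2.2).map (fun p => (p2f.get? p).getD 0)),
   w2f.items, p2f.items)

-- ===== PRECONDITION & SPEC =====
def Spec_detach_item (items : List (String × Option String × String)) (word2id : List (String × Int)) (phone2id : List (String × Int)) (out : List Int × List (List Int) × (List (String × Int)) × (List (String × Int))) : Prop := out = detach_item_alt items word2id phone2id
instance (items : List (String × Option String × String)) (word2id : List (String × Int)) (phone2id : List (String × Int)) (out : List Int × List (List Int) × (List (String × Int)) × (List (String × Int))) : Decidable (Spec_detach_item items word2id phone2id out) := by unfold Spec_detach_item; infer_instance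

-- ===== CLAIM (what is proved, stated in full; the proofs are below) =====
def Claim_equal_detach_item : Prop := ∀ (items : List (String × Option String × String)) (word2id : List (String × Int)) (phone2id : List (String × Int)), Dom_detach_item items word2id phone2id → Spec_detach_item items word2id phone2id (detach_item items word2id phone2id)

-- ===== LEMMAS AND PROOFS =====

-- A's 'if k not in d: n += 1; d[k] = n'
def assignId (d : PySem.Dict String Int) (n : Int) (k : String) : PySem.Dict String Int × Int :=
  if d.contains k then (d, n) else (d.insert k (n + 1), n + 1)

-- the dict/counter part of one iteration of A's loop
def detachStepB (st : PySem.Dict String Int × PySem.Dict String Int × Int × Int)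
    (item : String × Option String × String) :
    PySem.Dict String Int × PySem.Dict String Int × Int × Int :=
  let (w2n, p2n) := (assignId st.1 st.2.2.1 item.1,
                     (phonesOf item.2.1 item.2.2).foldl (fun q p => assignId q.1 q.2 p) (st.2.1, st.2.2.2))
  (w2n.1, p2n.1, w2n.2, p2n.2)

-- the new keys (not in d, first occurrences) of a key stream, as A's loop discovers them
def nk : PySem.Dict String Int → List String → List String
  | _, [] => []
  | d, p :: t => if d.contains p then nk d t else p :: nk (d.insert p 0) t

-- the same, with a plain "seen" list (the accumulator shape of PySem.Set.ofList)
def nkS : List String → List String → List String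
  | _, [] => []
  | s, p :: t => if s.contains p then nkS s t else p :: nkS (s ++ [p]) t

theorem nk_congr (l : List String) (d d' : PySem.Dict String Int)
    (h : ∀ x, d.contains x = d'.contains x) : nk d l = nk d' l := by
  induction l generalizing d d' with
  | nil => rfl
  | cons p t ih =>
    simp only [nk, h p]
    split_ifs with hc
    · exact ih d d' h
    · refine congrArg (p :: ·) (ih _ _ ?_)
      intro x
      simp [PySem.Dict.contains_insert, h x]

theorem foldl_add_eq_nkS (l s : List String) :
    List.foldl PySem.Set.add s l = s ++ nkS s l := by
  induction l generalizing s with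
  | nil => simp [nkS]
  | cons p t ih =>
    by_cases hc : p ∈ s
    · have h1 : PySem.Set.add s p = s := by simp [PySem.Set.add, hc]
      simp [List.foldl_cons, nkS, hc, ih]
    · have h1 : PySem.Set.add s p = s ++ [p] := by simp [PySem.Set.add, hc]
      simp [List.foldl_cons, nkS, hc, ih]

theorem dedup_eq_nkS (m : List String) : PySem.List.dedup m = nkS [] m := by
  have := foldl_add_eq_nkS m []
  simpa [PySem.List.dedup, PySem.Set.ofList, PySem.Set.empty] using this

theorem nk_eq_nkS (l : List String) (d0 d : PySem.Dict String Int) (s : List String)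
    (h : ∀ x, d.contains x = (d0.contains x || s.contains x)) :
    nk d l = nkS s (l.filter (fun p => !d0.contains p)) := by
  induction l generalizing d s with
  | nil => rfl
  | cons p t ih =>
    by_cases h0 : d0.contains p
    · have hdp : d.contains p = true := by simp [h p, h0]
      simp [nk, hdp, h0, ih d s h]
    · by_cases hs : p ∈ s
      · have hdp : d.contains p = true := by simp [h p, hs]
        simp [nk, hdp, h0, nkS, hs, ih d s h]
      · have hdp : d.contains p = false := by simp [h p, h0, hs]
        have ih' := ih (d.insert p 0) (s ++ [p]) (by
          intro x
          by_cases hx : x = p <;>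
            simp [PySem.Dict.contains_insert, h x, hx])
        simp [nk, hdp, h0, nkS, hs, ih']

-- shifting the start of enumerate into the id offset
theorem enum_shift (ks : List String) (dd : PySem.Dict String Int) (n s : Int) :
    (PySem.List.enumerate ks s).foldl (fun dd ik => dd.insert ik.2 (n + ik.1)) dd
      = (PySem.List.enumerate ks 0).foldl (fun dd ik => dd.insert ik.2 ((n + s) + ik.1)) dd := by
  induction ks generalizing dd n s with
  | nil => simp [PySem.List.enumerate_nil]
  | cons k t ih =>
    simp only [PySem.List.enumerate_cons, List.foldl_cons, zero_add, add_zero]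
    rw [ih _ n (s + 1), ih _ (n + s) 1]
    have h2 : (fun (dd : PySem.Dict String Int) (ik : Int × String) => dd.insert ik.2 (n + (s + 1) + ik.1))
        = (fun (dd : PySem.Dict String Int) (ik : Int × String) => dd.insert ik.2 (n + s + 1 + ik.1)) := by
      funext dd ik; ring_nf
    rw [h2]

-- the heart: A's incremental-assignment fold = dedup + enumerate + arithmetic ids
theorem assignFold_eq (l : List String) (d : PySem.Dict String Int) (n : Int) :
    l.foldl (fun q p => assignId q.1 q.2 p) (d, n)
      = ((PySem.List.enumerate (nk d l) 0).foldl (fun dd ik => dd.insert ik.2 (n + 1 + ik.1)) d,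
         n + (nk d l).length) := by
  induction l generalizing d n with
  | nil => simp [nk]
  | cons p t ih =>
    by_cases hc : d.contains p
    · simp only [List.foldl_cons]
      rw [show assignId d n p = (d, n) from by simp [assignId, hc],
          show nk d (p :: t) = nk d t from by simp [nk, hc]]
      exact ih d n
    · simp only [List.foldl_cons]
      rw [show assignId d n p = (d.insert p (n + 1), n + 1) from by simp [assignId, hc],
          show nk d (p :: t) = p :: nk (d.insert p 0) t from by simp [nk, hc]]
      rw [ih (d.insert p (n + 1)) (n + 1)]
      have hk : nk (d.insert p (n + 1)) t = nk (d.insert p 0) t := by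
        apply nk_congr
        intro x
        simp [PySem.Dict.contains_insert]
      rw [hk]
      simp only [PySem.List.enumerate_cons, List.foldl_cons, Prod.mk.injEq]
      constructor
      · have h0 : n + 1 + 0 = n + 1 := by ring
        rw [h0]
        simp only [zero_add]
        rw [enum_shift (nk (d.insert p 0) t) (d.insert p (n + 1)) (n + 1) 1]
      · simp [List.length_cons]; ring

-- A's word-dict evolution and phone-dict evolution are two independent assignId folds
theorem stepB_decompose (items : List (String × Option String × String))
    (w2 p2 : PySem.Dict String Int) (mw mp : Int) :
    items.foldl detachStepB (w2, p2, mw, mp)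
      = (((items.map (fun it => it.1)).foldl (fun q p => assignId q.1 q.2 p) (w2, mw)).1,
         ((items.flatMap (fun it => phonesOf it.2.1 it.2.2)).foldl (fun q p => assignId q.1 q.2 p) (p2, mp)).1,
         ((items.map (fun it => it.1)).foldl (fun q p => assignId q.1 q.2 p) (w2, mw)).2,
         ((items.flatMap (fun it => phonesOf it.2.1 it.2.2)).foldl (fun q p => assignId q.1 q.2 p) (p2, mp)).2) := by
  induction items generalizing w2 p2 mw mp with
  | nil => simp
  | cons it t ih =>
    simp only [List.map_cons, List.flatMap_cons, List.foldl_cons, List.foldl_append]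
    rw [show detachStepB (w2, p2, mw, mp) it
        = ((assignId w2 mw it.1).1,
           ((phonesOf it.2.1 it.2.2).foldl (fun q p => assignId q.1 q.2 p) (p2, mp)).1,
           (assignId w2 mw it.1).2,
           ((phonesOf it.2.1 it.2.2).foldl (fun q p => assignId q.1 q.2 p) (p2, mp)).2) from rfl]
    rw [ih]

-- ===== lookup-stability lemmas (for rewriting head lookups into the final dicts) =====

theorem assignId_preserves (d : PySem.Dict String Int) (n : Int) (k j : String) (v : Int)
    (h : d.get? j = some v) : ((assignId d n k).1).get? j = some v := by
  unfold assignId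
  split_ifs with hc
  · exact h
  · by_cases hjk : j = k
    · subst hjk
      rw [PySem.Dict.contains_eq_isSome_get?, h] at hc
      simp at hc
    · simpa [PySem.Dict.get?_insert, hjk] using h

theorem assignId_self (d : PySem.Dict String Int) (n : Int) (k : String) :
    ∃ v, ((assignId d n k).1).get? k = some v := by
  unfold assignId
  split_ifs with hc
  · rw [PySem.Dict.contains_eq_isSome_get?] at hc
    exact Option.isSome_iff_exists.mp hc
  · exact ⟨n + 1, PySem.Dict.get?_insert_self _ _ _⟩

theorem assignFold_preserves (l : List String) (st : PySem.Dict String Int × Int) (j : String) (v : Int)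
    (h : st.1.get? j = some v) :
    ((l.foldl (fun q p => assignId q.1 q.2 p) st).1).get? j = some v := by
  induction l generalizing st with
  | nil => exact h
  | cons p t ih => exact ih _ (assignId_preserves _ _ _ _ _ h)

theorem assignFold_self (l : List String) (st : PySem.Dict String Int × Int) (p : String)
    (hp : p ∈ l) : ∃ v, ((l.foldl (fun q p => assignId q.1 q.2 p) st).1).get? p = some v := by
  induction l generalizing st with
  | nil => cases hp
  | cons q t ih =>
    rcases List.mem_cons.mp hp with rfl | h
    · obtain ⟨v, hv⟩ := assignId_self st.1 st.2 p
      exact ⟨v, assignFold_preserves t _ _ _ hv⟩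
    · exact ih _ h

theorem pass1_preserves_w (items : List (String × Option String × String))
    (st : PySem.Dict String Int × PySem.Dict String Int × Int × Int) (j : String) (v : Int)
    (h : st.1.get? j = some v) : ((items.foldl detachStepB st).1).get? j = some v := by
  induction items generalizing st with
  | nil => exact h
  | cons it t ih =>
    exact ih _ (by simpa [detachStepB] using assignId_preserves st.1 st.2.2.1 it.1 j v h)

theorem pass1_preserves_p (items : List (String × Option String × String))
    (st : PySem.Dict String Int × PySem.Dict String Int × Int × Int) (j : String) (v : Int)
    (h : st.2.1.get? j = some v) : ((items.foldl detachStepB st).2.1).get? j = some v := by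
  induction items generalizing st with
  | nil => exact h
  | cons it t ih =>
    exact ih _ (by simpa [detachStepB] using
      assignFold_preserves (phonesOf it.2.1 it.2.2) (st.2.1, st.2.2.2) j v h)

theorem stepA_dicts (st : PySem.Dict String Int × PySem.Dict String Int × Int × Int × List Int × List (List Int))
    (it : String × Option String × String) :
    ((detachStepA st it).1, (detachStepA st it).2.1, (detachStepA st it).2.2.1, (detachStepA st it).2.2.2.1)
      = detachStepB (st.1, st.2.1, st.2.2.1, st.2.2.2.1) it := by
  obtain ⟨w2, p2, mw, mp, ws, ps⟩ := st
  obtain ⟨word, init, fin⟩ := it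
  cases init <;>
    simp only [detachStepA, detachStepB, assignId, phonesOf, List.foldl]

theorem stepA_seqs (st : PySem.Dict String Int × PySem.Dict String Int × Int × Int × List Int × List (List Int))
    (it : String × Option String × String) :
    (detachStepA st it).2.2.2.2.1
        = st.2.2.2.2.1 ++ [(((detachStepB (st.1, st.2.1, st.2.2.1, st.2.2.2.1) it).1).get? it.1).getD 0]
    ∧ (detachStepA st it).2.2.2.2.2
        = st.2.2.2.2.2 ++ [(phonesOf it.2.1 it.2.2).map
            (fun p => (((detachStepB (st.1, st.2.1, st.2.2.1, st.2.2.2.1) it).2.1).get? p).getD 0)] := by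
  obtain ⟨w2, p2, mw, mp, ws, ps⟩ := st
  obtain ⟨word, init, fin⟩ := it
  cases init <;>
    simp only [detachStepA, detachStepB, assignId, phonesOf, List.foldl, List.map] <;>
    exact ⟨trivial, trivial⟩

theorem stepB_word_some (st : PySem.Dict String Int × PySem.Dict String Int × Int × Int)
    (it : String × Option String × String) :
    ∃ v, ((detachStepB st it).1).get? it.1 = some v := by
  simpa [detachStepB] using assignId_self st.1 st.2.2.1 it.1

theorem stepB_phone_some (st : PySem.Dict String Int × PySem.Dict String Int × Int × Int)
    (it : String × Option String × String) (p : String) (hp : p ∈ phonesOf it.2.1 it.2.2) :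
    ∃ v, ((detachStepB st it).2.1).get? p = some v := by
  simpa [detachStepB] using assignFold_self (phonesOf it.2.1 it.2.2) (st.2.1, st.2.2.2) p hp

-- A's loop = dict evolution (detachStepB fold) followed by lookups in the final tables
theorem loop_eq (items : List (String × Option String × String))
    (w2 p2 : PySem.Dict String Int) (mw mp : Int) (ws : List Int) (ps : List (List Int)) :
    items.foldl detachStepA (w2, p2, mw, mp, ws, ps)
      = (let r := items.foldl detachStepB (w2, p2, mw, mp)
         (r.1, r.2.1, r.2.2.1, r.2.2.2,
          ws ++ items.map (fun it => (r.1.get? it.1).getD 0),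
          ps ++ items.map (fun it => (phonesOf it.2.1 it.2.2).map (fun p => (r.2.1.get? p).getD 0)))) := by
  induction items generalizing w2 p2 mw mp ws ps with
  | nil => simp
  | cons it t ih =>
    have hd := stepA_dicts (w2, p2, mw, mp, ws, ps) it
    have hs := stepA_seqs (w2, p2, mw, mp, ws, ps) it
    set st1 := detachStepB (w2, p2, mw, mp) it with hst1
    have hA : detachStepA (w2, p2, mw, mp, ws, ps) it
        = (st1.1, st1.2.1, st1.2.2.1, st1.2.2.2,
           ws ++ [((st1.1).get? it.1).getD 0],
           ps ++ [(phonesOf it.2.1 it.2.2).map (fun p => ((st1.2.1).get? p).getD 0)]) := by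
      have h1 := congrArg Prod.fst hd
      have h2 := congrArg (fun x => x.2.1) hd
      have h3 := congrArg (fun x => x.2.2.1) hd
      have h4 := congrArg (fun x => x.2.2.2) hd
      simp only at h1 h2 h3 h4
      obtain ⟨h5, h6⟩ := hs
      apply Prod.ext
      · exact h1
      apply Prod.ext
      · exact h2
      apply Prod.ext
      · exact h3
      apply Prod.ext
      · exact h4
      apply Prod.ext
      · simpa using h5
      · simpa using h6
    rw [List.foldl_cons, List.foldl_cons, hA, ih]
    set r := t.foldl detachStepB (st1.1, st1.2.1, st1.2.2.1, st1.2.2.2) with hr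
    obtain ⟨vw, hvw⟩ := stepB_word_some (w2, p2, mw, mp) it
    rw [← hst1] at hvw
    have hvw' : r.1.get? it.1 = some vw := by
      rw [hr]; exact pass1_preserves_w t _ _ _ hvw
    have hphones : (phonesOf it.2.1 it.2.2).map (fun p => ((st1.2.1).get? p).getD 0)
        = (phonesOf it.2.1 it.2.2).map (fun p => (r.2.1.get? p).getD 0) := by
      apply List.map_congr_left
      intro p hp
      obtain ⟨vp, hvp⟩ := stepB_phone_some (w2, p2, mw, mp) it p hp
      rw [← hst1] at hvp
      have : r.2.1.get? p = some vp := by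
        rw [hr]; exact pass1_preserves_p t _ _ _ hvp
      rw [hvp, this]
    simp [hvw, hvw', hphones, List.append_assoc]

-- one assignId fold, expressed exactly in B's vocabulary
theorem assignFold_fst (l : List String) (d : PySem.Dict String Int) (n : Int) :
    (l.foldl (fun q p => assignId q.1 q.2 p) (d, n)).1
      = (PySem.List.enumerate (PySem.List.dedup (l.filter (fun p => !d.contains p))) 0).foldl
          (fun dd ik => dd.insert ik.2 (n + 1 + ik.1)) d := by
  have hk : nk d l = PySem.List.dedup (l.filter (fun p => !d.contains p)) := by
    rw [dedup_eq_nkS]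
    exact nk_eq_nkS l d d [] (by intro x; simp)
  rw [assignFold_eq, ← hk]

-- ===== VERDICT (by name: the statement is the Claim_ definition above) =====
theorem detach_item_spec : Claim_equal_detach_item := by
  intro items word2id phone2id _
  show detach_item items word2id phone2id = detach_item_alt items word2id phone2id
  simp only [detach_item, detach_item_alt]
  have hmax : ∀ (l : List (String × Int)),
      (if l.length > 0 then (PySem.List.max? (PySem.Dict.mk l).values (fun v => v)).getD 2 else 2)
        = (PySem.List.max? (PySem.Dict.mk l).values (fun v => v)).getD 2 := by
    intro l
    split_ifs with h
    · rfl
    · have : l = [] := by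
        cases l with
        | nil => rfl
        | cons a t => simp at h
      subst this
      rfl
  rw [hmax, hmax, loop_eq, stepB_decompose, assignFold_fst, assignFold_fst]
  simp
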